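-- pv_equiv track=rewrite | github.com/pabloschwarzenberg/grader | hito2_ej1/hito2_ej1_ad70647df65dc1d5476ed58d13af1e08.py | align_sequences
-- ===== SOURCE A (Python) =====
-- def align_sequences(seq1, seq2):
--     aligned_seq = ""
--     j = 0
--
--     for i in range(len(seq1)):
--         if j < len(seq2) and seq1[i] == seq2[j]:
--             aligned_seq += seq2[j]
--             j += 1
--         else:
--             aligned_seq += "_"
--
--     aligned_seq += seq2[j:]
--
--     return aligned_seq
-- ===== SOURCE B (Python) =====
-- def align_sequences(seq1, seq2):
--     result = ["_"] * len(seq1)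
--     i = 0
--     count = 0
--     for ch in seq2:
--         while i < len(seq1) and seq1[i] != ch:
--             i += 1
--         if i == len(seq1):
--             break
--         result[i] = ch
--         i += 1
--         count += 1
--     return "".join(result) + seq2[count:]
-- ===== Notes on version B (the rewrite author's own statement) =====
-- stated objective: alternative
-- what changed: B pre-fills a result array of underscores and iterates over seq2 (the pattern), advancing a cursor into seq1 with an inner scan to the next match, instead of A's single pass over seq1 with a seq2 index; the tail is appended from the count of placed characters.
import Mathlib
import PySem

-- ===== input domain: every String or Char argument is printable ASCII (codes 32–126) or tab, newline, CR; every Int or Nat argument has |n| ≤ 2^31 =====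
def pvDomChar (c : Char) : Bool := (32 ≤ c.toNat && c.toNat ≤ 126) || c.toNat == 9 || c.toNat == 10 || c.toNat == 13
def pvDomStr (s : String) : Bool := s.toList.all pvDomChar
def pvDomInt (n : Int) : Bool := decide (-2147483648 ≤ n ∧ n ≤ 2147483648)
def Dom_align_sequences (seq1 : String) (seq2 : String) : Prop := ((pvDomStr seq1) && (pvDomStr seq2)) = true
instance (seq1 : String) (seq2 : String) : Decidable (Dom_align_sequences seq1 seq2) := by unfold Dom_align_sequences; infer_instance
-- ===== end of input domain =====

-- B differs from A only in structure (outer loop over seq2 with an inner scan of seq1,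
-- writing into a pre-filled underscore array); same return value, no side effects.

-- ===== PORT A =====
-- the 'for i in range(len(seq1))' loop: state is (aligned_seq, j); seq1 is consumed left to right
def alignA_loop (s2 : List Char) : List Char → Nat → List Char × Nat
  | [], j => ([], j)
  | c :: rest, j =>
    if s2[j]? = some c then           -- j < len(seq2) and seq1[i] == seq2[j]
      let p := alignA_loop s2 rest (j + 1)
      (c :: p.1, p.2)
    else
      let p := alignA_loop s2 rest j
      ('_' :: p.1, p.2)

def align_sequences (seq1 : String) (seq2 : String) : String :=
  let p := alignA_loop seq2.toList seq1.toList 0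
  -- seq2[j:] with 0 ≤ j : exact as PySem slice
  String.mk (p.1 ++ PySem.List.slice seq2.toList (some (p.2 : Int)) none)

-- ===== PORT B =====
-- the inner 'while i < len(seq1) and seq1[i] != ch: i += 1'
def altScan (s1 : List Char) (ch : Char) (i : Nat) : Nat :=
  if h : i < s1.length then
    if s1[i] ≠ ch then altScan s1 ch (i + 1) else i
  else i
termination_by s1.length - i

-- the 'for ch in seq2' loop: state is (result, i, count)
def altLoop (s1 : List Char) : List Char → List Char → Nat → Nat → List Char × Nat
  | [], res, _, count => (res, count)
  | ch :: rest, res, i, count =>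
    let i' := altScan s1 ch i
    if i' = s1.length then (res, count)           -- break
    else altLoop s1 rest (res.set i' ch) (i' + 1) (count + 1)

def align_sequences_alt (seq1 : String) (seq2 : String) : String :=
  let s1 := seq1.toList
  let p := altLoop s1 seq2.toList (List.replicate s1.length '_') 0 0
  -- seq2[count:] with 0 ≤ count : exact as PySem slice
  String.mk (p.1 ++ PySem.List.slice seq2.toList (some (p.2 : Int)) none)

-- ===== PRECONDITION & SPEC =====
def Spec_align_sequences (seq1 : String) (seq2 : String) (out : String) : Prop := out = align_sequences_alt seq1 seq2
instance (seq1 : String) (seq2 : String) (out : String) : Decidable (Spec_align_sequences seq1 seq2 out) := by unfold Spec_align_sequences; infer_instance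

-- ===== CLAIM (what is proved, stated in full; the proofs are below) =====
def Claim_equal_align_sequences : Prop := ∀ (seq1 : String) (seq2 : String), Dom_align_sequences seq1 seq2 → Spec_align_sequences seq1 seq2 (align_sequences seq1 seq2)

-- ===== LEMMAS AND PROOFS =====

-- common reference: greedy alignment consuming both lists; returns (aligned chars, matches)
def core : List Char → List Char → List Char × Nat
  | [], _ => ([], 0)
  | c :: rest, d :: s2r =>
    if c = d then
      let p := core rest s2r
      (c :: p.1, p.2 + 1)
    else
      let p := core rest (d :: s2r)
      ('_' :: p.1, p.2)
  | _ :: rest, [] =>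
    let p := core rest []
    ('_' :: p.1, p.2)

theorem alignA_loop_eq (s2 s1 : List Char) : ∀ j : Nat,
    alignA_loop s2 s1 j = ((core s1 (s2.drop j)).1, j + (core s1 (s2.drop j)).2) := by
  induction s1 with
  | nil => intro j; simp [alignA_loop, core]
  | cons c rest ih =>
    intro j
    rcases hd : s2.drop j with _ | ⟨d, s2r⟩
    · have hj : s2.length ≤ j := by
        by_contra h
        simp [List.drop_eq_nil_iff] at hd; omega
      have hget : s2[j]? = none := by simp; omega
      simp [alignA_loop, core, hget, hd, ih j]
    · have hget : s2[j]? = some d := by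
        have h0 := congrArg (fun l => l[0]?) hd
        simpa using h0
      have hd1 : s2.drop (j + 1) = s2r := by
        have h1 : List.drop 1 (List.drop j s2) = List.drop (j + 1) s2 := by
          rw [List.drop_drop]
        rw [← h1, hd]; rfl
      by_cases hc : c = d
      · subst hc
        simp [alignA_loop, core, hget, hd, hd1, ih (j + 1)]
        omega
      · have hdc : ¬ d = c := fun h => hc h.symm
        simp [alignA_loop, core, hget, hd, hc, hdc, ih j]

theorem altScan_spec (s1 : List Char) (ch : Char) : ∀ i : Nat, i ≤ s1.length →
    i ≤ altScan s1 ch i ∧ altScan s1 ch i ≤ s1.length ∧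
      (∀ k (hk : k < s1.length), i ≤ k → k < altScan s1 ch i → s1[k] ≠ ch) ∧
      (∀ h : altScan s1 ch i < s1.length, s1[altScan s1 ch i] = ch) := by
  have main : ∀ n i, s1.length - i = n → i ≤ s1.length →
      i ≤ altScan s1 ch i ∧ altScan s1 ch i ≤ s1.length ∧
        (∀ k (hk : k < s1.length), i ≤ k → k < altScan s1 ch i → s1[k] ≠ ch) ∧
        (∀ h : altScan s1 ch i < s1.length, s1[altScan s1 ch i] = ch) := by
    intro n
    induction n using Nat.strong_induction_on with
    | _ n ihn =>
      intro i hni hi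
      by_cases h : i < s1.length
      · by_cases hne : s1[i] ≠ ch
        · have hstep : altScan s1 ch i = altScan s1 ch (i + 1) := by
            rw [altScan]; simp [h, hne]
          have hrec := ihn (s1.length - (i + 1)) (by omega) (i + 1) rfl (by omega)
          rw [hstep]
          obtain ⟨h1, h2, h3, h4⟩ := hrec
          refine ⟨by omega, h2, ?_, h4⟩
          intro k hk hik hki
          rcases Nat.eq_or_lt_of_le hik with rfl | hlt
          · exact hne
          · exact h3 k hk hlt hki
        · push_neg at hne
          have hstep : altScan s1 ch i = i := by
            rw [altScan]; simp [h, hne]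
          rw [hstep]
          exact ⟨le_refl _, le_of_lt h, fun k hk h1 h2 => absurd h2 (by omega),
            fun _ => hne⟩
      · have hstep : altScan s1 ch i = i := by
          rw [altScan]; simp [h]
        rw [hstep]
        exact ⟨le_refl _, hi, fun k hk h1 h2 => absurd h2 (by omega), fun hlt => absurd hlt h⟩
  intro i hi
  exact main (s1.length - i) i rfl hi

theorem core_skip (s1 : List Char) (ch : Char) (rest : List Char) :
    ∀ n i i', i' = i + n → i' ≤ s1.length →
    (∀ k (hk : k < s1.length), i ≤ k → k < i' → s1[k] ≠ ch) →
    (∀ h : i' < s1.length, s1[i'] = ch) →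
    core (s1.drop i) (ch :: rest) =
      if i' < s1.length then
        (List.replicate (i' - i) '_' ++ ch :: (core (s1.drop (i' + 1)) rest).1,
         (core (s1.drop (i' + 1)) rest).2 + 1)
      else (List.replicate (s1.length - i) '_', 0) := by
  intro n
  induction n with
  | zero =>
    intro i i' hii' hi'len hno hmatch
    have h0 : i' = i := by omega
    subst h0
    by_cases h : i' < s1.length
    · rw [List.drop_eq_getElem_cons h]
      have := hmatch h
      simp [core, this, h]
    · have hi : i' = s1.length := by omega
      have hnil : s1.drop i' = [] := by simp [List.drop_eq_nil_iff]; omega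
      rw [hnil]
      simp [core, h, hi]
  | succ n ihn =>
    intro i i' hii' hi'len hno hmatch
    have hilen : i < s1.length := by omega
    rw [List.drop_eq_getElem_cons hilen]
    have hne : s1[i] ≠ ch := hno i hilen (le_refl _) (by omega)
    have hrec := ihn (i + 1) i' (by omega) hi'len
      (fun k hk h1 h2 => hno k hk (by omega) h2) hmatch
    simp only [core, hne, if_neg, hrec]
    by_cases h : i' < s1.length
    · simp only [h, if_pos]
      have : i' - i = (i' - (i + 1)) + 1 := by omega
      rw [this, List.replicate_succ]
      simp
    · simp only [h, if_neg]
      have : s1.length - i = (s1.length - (i + 1)) + 1 := by omega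
      rw [this, List.replicate_succ]
      simp

theorem core_nil (s1 : List Char) : core s1 [] = (List.replicate s1.length '_', 0) := by
  induction s1 with
  | nil => rfl
  | cons c rest ih => simp [core, ih, List.replicate_succ]

theorem altLoop_eq (s1 : List Char) : ∀ (s2r res : List Char) (i count : Nat),
    i ≤ s1.length → res.length = s1.length →
    res.drop i = List.replicate (s1.length - i) '_' →
    altLoop s1 s2r res i count =
      (res.take i ++ (core (s1.drop i) s2r).1, count + (core (s1.drop i) s2r).2) := by
  intro s2r
  induction s2r with
  | nil =>
    intro res i count hi hlen hdrop
    rw [core_nil]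
    have hres : res.take i ++ List.replicate (s1.length - i) '_' = res := by
      conv_rhs => rw [← List.take_append_drop i res]
      rw [hdrop]
    simp [altLoop, hres]
  | cons ch rest ih =>
    intro res i count hi hlen hdrop
    obtain ⟨hscan1, hscan2, hscan3, hscan4⟩ := altScan_spec s1 ch i hi
    have hcore := core_skip s1 ch rest (altScan s1 ch i - i) i (altScan s1 ch i)
      (by omega) hscan2 hscan3 hscan4
    by_cases hbreak : altScan s1 ch i = s1.length
    · have hnl : ¬ altScan s1 ch i < s1.length := by omega
      rw [if_neg hnl] at hcore
      have : res.take i ++ List.replicate (s1.length - i) '_' = res := by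
        rw [← hdrop, List.take_append_drop]
      simp [altLoop, hbreak, hcore, this]
    · have hlt : altScan s1 ch i < s1.length := by omega
      rw [if_pos hlt] at hcore
      have hsetlen : (res.set (altScan s1 ch i) ch).length = s1.length := by simp [hlen]
      have hsetdrop : (res.set (altScan s1 ch i) ch).drop (altScan s1 ch i + 1) =
          List.replicate (s1.length - (altScan s1 ch i + 1)) '_' := by
        rw [List.drop_set_of_lt (by omega)]
        have h1 : res.drop (altScan s1 ch i + 1) =
            List.drop (altScan s1 ch i + 1 - i) (res.drop i) := by
          rw [List.drop_drop]; congr 1; omega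
        rw [h1, hdrop, List.drop_replicate]
        congr 1; omega
      have hIH := ih (res.set (altScan s1 ch i) ch) (altScan s1 ch i + 1) (count + 1)
        (by omega) hsetlen hsetdrop
      have htake : (res.set (altScan s1 ch i) ch).take (altScan s1 ch i + 1) =
          res.take i ++ List.replicate (altScan s1 ch i - i) '_' ++ [ch] := by
        have hidx : altScan s1 ch i < res.length := by omega
        rw [List.take_add_one]
        have h5 : (res.set (altScan s1 ch i) ch).take (altScan s1 ch i) =
            res.take (altScan s1 ch i) := by
          simp [List.take_set, List.set_eq_of_length_le]
        have h6 : res.take (altScan s1 ch i) =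
            res.take i ++ List.replicate (altScan s1 ch i - i) '_' := by
          have h7 : altScan s1 ch i = i + (altScan s1 ch i - i) := by omega
          rw [h7, List.take_add, hdrop, List.take_replicate]
          congr 2; omega
        simp [h5, h6, hidx]
      simp only [altLoop, hbreak, if_false, hIH, hcore, htake]
      rw [Prod.ext_iff]
      exact ⟨by simp, by dsimp only; omega⟩
  
-- ===== VERDICT (by name: the statement is the Claim_ definition above) =====
theorem align_sequences_spec : Claim_equal_align_sequences := by
  intro seq1 seq2 _
  show align_sequences seq1 seq2 = align_sequences_alt seq1 seq2
  simp only [align_sequences, align_sequences_alt]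
  rw [altLoop_eq seq1.toList seq2.toList (List.replicate seq1.toList.length '_') 0 0
      (Nat.zero_le _) (by simp) (by simp),
      alignA_loop_eq seq2.toList seq1.toList 0]
  simp
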